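-- pv_equiv track=rewrite | github.com/sunnytake/CodeAndDecode | 左神/进阶班/第二课/每个数左右两边最近比它大.py | getNearestLarge
-- ===== SOURCE A (Python) =====
-- def getNearestLarge(array):
--     res_left_large = [None]*len(array)
--     res_right_large = [None]*len(array)
--     stack = []
--     for index, val in enumerate(array):
--         while stack and array[stack[-1]] < val:
--             res_right_large[stack[-1]] = val
--             stack.pop()
--         if stack:
--             large_index = None
--             for i in stack[::-1]:
--                 if array[i] > val:
--                     large_index = i
--                     break
--             if large_index is not None:
--                 res_left_large[index] = array[large_index]
--             else:
--                 res_left_large[index] = None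
--         else:
--             res_left_large[index] = None
--         stack.append(index)
--
--     while stack:
--         index = stack.pop()
--         res_right_large[index] = None
--     return res_left_large, res_right_large
-- ===== SOURCE B (Python) =====
-- def _scan(xs):
--     # nearest strictly greater value to the LEFT of each element, via a
--     # strictly decreasing monotonic stack of values (pop while top <= v).
--     res = []
--     st = []
--     for v in xs:
--         while st and st[-1] <= v:
--             st.pop()
--         res.append(st[-1] if st else None)
--         st.append(v)
--     return res
--
--
-- def getNearestLarge(array):
--     return _scan(array), _scan(array[::-1])[::-1]
-- ===== Notes on version B (the rewrite author's own statement) =====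
-- stated objective: faster
-- what changed: Replaced the single forward pass that rescans the whole index stack for each element (and back-patches the right answers while popping) by two independent linear monotonic-stack passes over values, one forward for the left answers and one over the reversed array for the right answers.
import Mathlib
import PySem

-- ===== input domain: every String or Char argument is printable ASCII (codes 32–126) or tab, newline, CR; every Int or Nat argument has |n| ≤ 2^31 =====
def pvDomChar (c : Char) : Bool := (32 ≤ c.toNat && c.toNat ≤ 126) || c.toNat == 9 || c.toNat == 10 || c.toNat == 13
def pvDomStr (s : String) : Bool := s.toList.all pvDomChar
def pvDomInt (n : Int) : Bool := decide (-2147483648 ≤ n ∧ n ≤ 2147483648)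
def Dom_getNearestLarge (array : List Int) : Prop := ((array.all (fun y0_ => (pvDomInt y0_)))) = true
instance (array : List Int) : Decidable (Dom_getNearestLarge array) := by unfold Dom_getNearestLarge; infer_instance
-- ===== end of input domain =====

-- B replaces A's single pass (which rescans the index stack for every element) by two
-- independent linear monotonic-stack passes; objective: faster (asymptotic).

-- ===== PORT A =====

-- the inner `while stack and array[stack[-1]] < val` loop of A (pops and back-patches res_right)
def popLoopA (a : List Int) (val : Int) (R : List (Option Int)) (S : List Int) :
    List (Option Int) × List Int :=
  if hS : S = [] then (R, S)
  else
    let t := S.getLast hS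
    if PySem.List.pyGetD a t 0 < val then
      popLoopA a val (PySem.List.pySetD R t (some val)) S.dropLast
    else (R, S)
termination_by S.length
decreasing_by
  simp only [List.length_dropLast]
  have : S.length ≠ 0 := fun h => hS (List.eq_nil_of_length_eq_zero h)
  omega

-- the inner `for i in stack[::-1]: if array[i] > val: large_index = i; break` loop of A
def findGTA (a : List Int) (val : Int) : List Int → Option Int
  | [] => none
  | i :: rest => if PySem.List.pyGetD a i 0 > val then some i else findGTA a val rest

-- one iteration of A's main `for index, val in enumerate(array)` loop
def stepA (a : List Int) (st : List (Option Int) × List (Option Int) × List Int)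
    (iv : Int × Int) : List (Option Int) × List (Option Int) × List Int :=
  let RS := popLoopA a iv.2 st.2.1 st.2.2
  -- `stack[::-1]` is List.reverse (PySem.List.slice?_none_none_neg_one); the collapsed
  -- `if stack / large_index is None` branches both assign none exactly when findGTA finds nothing
  let L' := PySem.List.pySetD st.1 iv.1
      (match findGTA a iv.2 RS.2.reverse with
       | some j => some (PySem.List.pyGetD a j 0)
       | none => none)
  (L', RS.1, RS.2 ++ [iv.1])

-- the final `while stack: res_right_large[stack.pop()] = None` loop of A
def drainA (R : List (Option Int)) (S : List Int) : List (Option Int) :=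
  if hS : S = [] then R
  else drainA (PySem.List.pySetD R (S.getLast hS) none) S.dropLast
termination_by S.length
decreasing_by
  simp only [List.length_dropLast]
  have : S.length ≠ 0 := fun h => hS (List.eq_nil_of_length_eq_zero h)
  omega

def getNearestLarge (array : List Int) : List (Option Int) × List (Option Int) :=
  let resL := List.replicate array.length (none : Option Int)
  let resR := List.replicate array.length (none : Option Int)
  let fin := (PySem.List.enumerate array).foldl (stepA array) (resL, resR, ([] : List Int))
  (fin.1, drainA fin.2.1 fin.2.2)

-- ===== PORT B =====

-- B's `while st and st[-1] <= v: st.pop()`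
def popLE (st : List Int) (v : Int) : List Int :=
  if h : st = [] then st
  else if st.getLast h ≤ v then popLE st.dropLast v else st
termination_by st.length
decreasing_by
  simp only [List.length_dropLast]
  have : st.length ≠ 0 := fun hh => h (List.eq_nil_of_length_eq_zero hh)
  omega

-- B's `_scan`: nearest strictly greater value to the left of each element
def scanB (xs : List Int) : List (Option Int) :=
  let fin := xs.foldl (fun acc v =>
    let st' := popLE acc.2 v
    (acc.1 ++ [st'.getLast?], st' ++ [v])) (([] : List (Option Int)), ([] : List Int))
  fin.1

def getNearestLarge_alt (array : List Int) : List (Option Int) × List (Option Int) :=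
  -- array[::-1] is List.reverse (PySem.List.slice?_none_none_neg_one)
  (scanB array, (scanB array.reverse).reverse)

-- ===== PRECONDITION & SPEC =====
def Spec_getNearestLarge (array : List Int) (out : List (Option Int) × List (Option Int)) : Prop := out = getNearestLarge_alt array
instance (array : List Int) (out : List (Option Int) × List (Option Int)) : Decidable (Spec_getNearestLarge array out) := by unfold Spec_getNearestLarge; infer_instance

-- ===== CLAIM (what is proved, stated in full; the proofs are below) =====
def Claim_equal_getNearestLarge : Prop := ∀ (array : List Int), Dom_getNearestLarge array → Spec_getNearestLarge array (getNearestLarge array)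

-- ===== LEMMAS AND PROOFS =====

-- value of a at a Nat index (both programs only ever index in range)
def aGet (a : List Int) (j : Nat) : Int := a.getD j 0

-- nearest strictly greater value to the LEFT of position i
def lSpec (a : List Int) (i : Nat) : Option Int :=
  (a.take i).reverse.find? (fun x => decide (x > aGet a i))

-- nearest strictly greater value to the RIGHT of position j, seen within the first k elements
def rSpecAt (a : List Int) (k j : Nat) : Option Int :=
  ((a.take k).drop (j + 1)).find? (fun x => decide (x > aGet a j))

-- A's three state components after k iterations of the main loop
def Lk (a : List Int) (k : Nat) : List (Option Int) :=
  (List.range a.length).map (fun i => if i < k then lSpec a i else none)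
def Rk (a : List Int) (k : Nat) : List (Option Int) :=
  (List.range a.length).map (fun j => if j < k then rSpecAt a k j else none)
def SkN (a : List Int) (k : Nat) : List Nat :=
  (List.range k).filter (fun m => ((a.take k).drop (m + 1)).all (fun x => decide (x ≤ aGet a m)))


-- the pop condition of A's inner while loop
def popP (a : List Int) (val : Int) (t : Int) : Bool := decide (PySem.List.pyGetD a t 0 < val)

-- A's stack after k iterations, as the Int list the port carries
def Sk (a : List Int) (k : Nat) : List Int := (SkN a k).map (fun m : Nat => (m : Int))

-- ---- characterisations of the three small loops ----

lemma reverse_eq_getLast_cons {α : Type} (l : List α) (h : l ≠ []) :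
    l.reverse = l.getLast h :: l.dropLast.reverse := by
  conv_lhs => rw [← List.dropLast_append_getLast h]
  simp

lemma popLoopA_eq (a : List Int) (val : Int) (R : List (Option Int)) (S : List Int) :
    popLoopA a val R S =
      ((S.reverse.takeWhile (popP a val)).foldl
          (fun R t => PySem.List.pySetD R t (some val)) R,
       (S.reverse.dropWhile (popP a val)).reverse) := by
  fun_induction popLoopA a val R S with
  | case1 R => simp
  | case2 R S hS t hlt ih =>
    rw [reverse_eq_getLast_cons S hS]
    have hp : popP a val (S.getLast hS) = true := by
      simp only [popP, decide_eq_true_eq]; exact hlt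
    simp only [List.takeWhile_cons, List.dropWhile_cons, hp, if_pos, List.foldl_cons]
    simpa using ih
  | case3 R S hS t hlt =>
    rw [reverse_eq_getLast_cons S hS]
    have hp : popP a val (S.getLast hS) = false := by
      simp only [popP, decide_eq_false_iff_not]; exact hlt
    simp only [List.takeWhile_cons, List.dropWhile_cons, hp]
    simp [← reverse_eq_getLast_cons S hS]

lemma drainA_eq (R : List (Option Int)) (S : List Int) :
    drainA R S = S.reverse.foldl (fun R t => PySem.List.pySetD R t none) R := by
  fun_induction drainA R S with
  | case1 R => simp
  | case2 R S hS ih =>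
    rw [reverse_eq_getLast_cons S hS]
    simpa using ih

-- ---- generic list facts specific to this development ----

-- if elements failing q also fail p, filtering by q does not change find? p
lemma find?_filter_of {α : Type} (l : List α) (p q : α → Bool)
    (h : ∀ x ∈ l, p x = true → q x = true) :
    (l.filter q).find? p = l.find? p := by
  induction l with
  | nil => rfl
  | cons x t ih =>
    have ih' := ih (fun y hy => h y (List.mem_cons_of_mem x hy))
    by_cases hq : q x = true
    · by_cases hp : p x = true <;> simp [hq, hp, ih']
    · have hp : p x = false := by
        cases hpx : p x with
        | false => rfl
        | true => exact absurd (h x (List.mem_cons_self) hpx) hq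
      simp [hq, hp, ih']

-- once an element fails P all later ones do: takeWhile/dropWhile are filters
lemma takeWhile_eq_filter_of_pairwise {α : Type} (l : List α) (P : α → Bool)
    (h : l.Pairwise (fun x y => P x = false → P y = false)) :
    l.takeWhile P = l.filter P ∧ l.dropWhile P = l.filter (fun x => !P x) := by
  induction l with
  | nil => exact ⟨rfl, rfl⟩
  | cons x t ih =>
    rcases List.pairwise_cons.mp h with ⟨hx, ht⟩
    rcases ih ht with ⟨ih1, ih2⟩
    cases hP : P x with
    | true => simp [hP, ih1, ih2]
    | false =>
      have hall : ∀ y ∈ t, P y = false := fun y hy => hx y hy hP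
      have h1 : t.filter P = [] := List.filter_eq_nil_iff.mpr (by
        intro y hy; simp [hall y hy])
      have h2 : t.filter (fun x => !P x) = t := List.filter_eq_self.mpr (by
        intro y hy; simp [hall y hy])
      simp [hP, h1, h2]

-- pointwise value of a fold that sets the same value at every index of l
lemma getElem?_foldl_set (l : List Nat) (R : List (Option Int)) (v : Option Int) (j : Nat) :
    ((l.foldl (fun R t => R.set t v) R))[j]? =
      if j ∈ l ∧ j < R.length then some v else R[j]? := by
  induction l generalizing R with
  | nil => simp
  | cons t rest ih =>
    simp only [List.foldl_cons]
    rw [ih]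
    simp only [List.length_set]
    by_cases hmem : j ∈ rest
    · by_cases hlen : j < R.length <;> simp [hmem, hlen]
    · rw [List.getElem?_set]
      by_cases hjt : j = t
      · subst hjt
        by_cases hlen : j < R.length <;> simp [hmem, hlen]
      · simp [hmem, Ne.symm hjt, hjt, List.mem_cons]

-- ---- facts about A's invariant state ----

lemma length_Lk (a : List Int) (k : Nat) : (Lk a k).length = a.length := by
  simp [Lk]

lemma length_Rk (a : List Int) (k : Nat) : (Rk a k).length = a.length := by
  simp [Rk]

lemma mem_SkN (a : List Int) (k : Nat) (m : Nat) :
    m ∈ SkN a k ↔ m < k ∧ ∀ x ∈ (a.take k).drop (m + 1), x ≤ aGet a m := by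
  simp [SkN]

lemma take_succ_aGet (a : List Int) (k : Nat) (hk : k < a.length) :
    a.take (k + 1) = a.take k ++ [aGet a k] := by
  rw [List.take_add_one]
  congr 1
  simp [aGet, List.getElem?_eq_getElem hk]

-- the recurrence the main loop realises on the stack (k < a.length)
lemma SkN_succ (a : List Int) (k : Nat) (hk : k < a.length) :
    SkN a (k + 1) =
      (SkN a k).filter (fun m => decide (aGet a k ≤ aGet a m)) ++ [k] := by
  unfold SkN
  rw [List.range_succ, List.filter_append, List.filter_filter]
  congr 1
  · apply List.filter_congr
    intro m hm
    have hmk : m < k := List.mem_range.mp hm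
    have hlen : m + 1 ≤ (a.take k).length := by simp; omega
    rw [take_succ_aGet a k hk, List.drop_append_of_le_length hlen, List.all_append]
    simp [Bool.and_comm]
  · have hnil : (a.take (k + 1)).drop (k + 1) = [] := by
      apply List.drop_eq_nil_of_le; simp
    simp [hnil]

-- stack values are non-increasing bottom to top
lemma SkN_pairwise (a : List Int) (k : Nat) (hk : k ≤ a.length) :
    (SkN a k).Pairwise (fun m1 m2 => aGet a m2 ≤ aGet a m1) := by
  unfold SkN
  rw [List.pairwise_filter]
  apply (List.pairwise_lt_range).imp_of_mem
  intro m1 m2 h1 h2 hlt hc1 _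
  have hm2 : m2 < k := List.mem_range.mp h2
  have hlen : (a.take k).length = k := by simp; omega
  have hidx : m1 + 1 + (m2 - m1 - 1) = m2 := by omega
  have hb : m2 - m1 - 1 < ((a.take k).drop (m1 + 1)).length := by
    simp [hlen]; omega
  have hmem : aGet a m2 ∈ (a.take k).drop (m1 + 1) := by
    have hval : ((a.take k).drop (m1 + 1))[m2 - m1 - 1]'hb = aGet a m2 := by
      rw [List.getElem_drop, List.getElem_take]
      simp only [hidx, aGet, List.getD_eq_getElem a 0 (show m2 < a.length by omega)]
    exact hval ▸ List.getElem_mem hb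
  simpa using (List.all_eq_true.mp hc1) (aGet a m2) hmem

lemma filter_map_comm {α β : Type} (f : β → α) (q : α → Bool) (l : List β) :
    (l.map f).filter q = (l.filter (fun x => q (f x))).map f := by
  induction l with
  | nil => rfl
  | cons x t ih => by_cases h : q (f x) <;> simp [h, ih]

-- dropping stack entries with value < c cannot change a find? for a value > v when c ≤ v + 1
lemma find_map_filter (a : List Int) (l : List Nat) (c v : Int) (h : c ≤ v + 1) :
    (((l.filter (fun m => decide (c ≤ aGet a m))).reverse.map (aGet a)).find?
        (fun x => decide (x > v))) =
      ((l.reverse.map (aGet a)).find? (fun x => decide (x > v))) := by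
  rw [← List.filter_reverse, ← filter_map_comm (aGet a) (fun x => decide (c ≤ x)) l.reverse]
  apply find?_filter_of
  intro x _ hx
  simp only [decide_eq_true_eq] at hx ⊢
  omega

-- scanning the stack top-down for a value > v sees exactly the prefix top-down
lemma SkN_find (a : List Int) (k : Nat) (hk : k ≤ a.length) (v : Int) :
    ((SkN a k).reverse.map (aGet a)).find? (fun x => decide (x > v)) =
      (a.take k).reverse.find? (fun x => decide (x > v)) := by
  induction k generalizing v with
  | zero => simp [SkN]
  | succ k ih =>
    have hk' : k < a.length := by omega
    rw [SkN_succ a k hk', take_succ_aGet a k hk']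
    simp only [List.reverse_append, List.reverse_cons, List.reverse_nil, List.nil_append,
      List.map_cons, List.cons_append, List.find?_cons]
    by_cases hv : aGet a k > v
    · simp [hv]
    · have hd : (decide (aGet a k > v)) = false := by simpa using hv
      simp only [hd]
      rw [find_map_filter a (SkN a k) (aGet a k) v (by omega)]
      exact ih (by omega) v

-- ---- the main induction for A ----

lemma getElem?_Lk (a : List Int) (k j : Nat) :
    (Lk a k)[j]? = if j < a.length then some (if j < k then lSpec a j else none) else none := by
  by_cases hj : j < a.length
  · simp [Lk, hj]
  · simp [Lk, hj]

lemma getElem?_Rk (a : List Int) (k j : Nat) :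
    (Rk a k)[j]? = if j < a.length then some (if j < k then rSpecAt a k j else none) else none := by
  by_cases hj : j < a.length
  · simp [Rk, hj]
  · simp [Rk, hj]

-- value returned by A's inner reverse scan, as a find? over the corresponding values
lemma findGTA_map (a : List Int) (val : Int) (l : List Nat) :
    (match findGTA a val (l.map (fun m : Nat => (m : Int))) with
     | some j => some (PySem.List.pyGetD a j 0)
     | none => none) = (l.map (aGet a)).find? (fun x => decide (x > val)) := by
  induction l with
  | nil => rfl
  | cons m t ih =>
    rw [List.map_cons, List.map_cons, findGTA]
    by_cases hm : PySem.List.pyGetD a (m : Int) 0 > val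
    · have hd : (decide (aGet a m > val)) = true := by
        simpa [aGet] using hm
      rw [if_pos hm, List.find?_cons_of_pos (p := fun x => decide (x > val)) (h := hd)]
      simp [aGet]
    · have hd : (decide (aGet a m > val)) = false := by
        simpa [aGet] using hm
      rw [if_neg hm, List.find?_cons_of_neg (p := fun x => decide (x > val)) (h := by simp [hd])]
      exact ih

-- what A's inner while loop does to (res_right, stack) at step k
lemma pop_result (a : List Int) (k : Nat) (hk : k < a.length) (R : List (Option Int)) :
    popLoopA a (aGet a k) R (Sk a k) =
      (((SkN a k).filter (fun m => decide (aGet a m < aGet a k))).foldl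
          (fun R t => R.set t (some (aGet a k))) R,
       ((SkN a k).filter (fun m => decide (aGet a k ≤ aGet a m))).map (fun m : Nat => (m : Int))) := by
  have hpw : (SkN a k).reverse.Pairwise
      (fun x y => (decide (aGet a x < aGet a k)) = false → (decide (aGet a y < aGet a k)) = false) := by
    rw [List.pairwise_reverse]
    apply (SkN_pairwise a k (le_of_lt hk)).imp
    intro m1 m2 hle h2
    simp only [decide_eq_false_iff_not, not_lt] at h2 ⊢
    omega
  obtain ⟨htw, hdw⟩ := takeWhile_eq_filter_of_pairwise _ _ hpw
  have hcomp : (fun m : Nat => popP a (aGet a k) ((m : Int))) =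
      (fun m : Nat => decide (aGet a m < aGet a k)) := by
    funext m; simp [popP, aGet]
  rw [popLoopA_eq]
  unfold Sk
  rw [← List.map_reverse, List.takeWhile_map, List.dropWhile_map]
  simp only [Function.comp_def, hcomp, htw, hdw]
  refine Prod.ext ?_ ?_
  · show List.foldl _ R (List.map _ _) = _
    rw [List.foldl_map]
    have hfun2 : (fun (x : List (Option Int)) (y : Nat) =>
        PySem.List.pySetD x ((y : Int)) (some (aGet a k))) =
        (fun (x : List (Option Int)) (y : Nat) => x.set y (some (aGet a k))) := by
      funext x y; simp [PySem.List.pySetD_natCast]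
    rw [hfun2, List.filter_reverse]
    apply List.ext_getElem?
    intro j
    rw [getElem?_foldl_set, getElem?_foldl_set]
    simp
  · show (List.map _ _).reverse = _
    rw [List.filter_reverse, List.map_reverse, List.reverse_reverse]
    congr 1
    apply List.filter_congr
    intro m _
    by_cases h : aGet a m < aGet a k
    · simp [h, not_le.mpr h]
    · simp [h, not_lt.mp h]


lemma Lk_step (a : List Int) (k : Nat) (hk : k < a.length) :
    (Lk a k).set k (lSpec a k) = Lk a (k + 1) := by
  apply List.ext_getElem?
  intro j
  rw [List.getElem?_set, getElem?_Lk, getElem?_Lk, length_Lk]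
  by_cases hjk : j = k
  · subst hjk
    simp [hk]
  · have : j < k ↔ j < k + 1 := by omega
    simp [Ne.symm hjk, this]

-- res_right after step k, given res_right after k steps
lemma Rk_step (a : List Int) (k : Nat) (hk : k < a.length) :
    ((SkN a k).filter (fun m => decide (aGet a m < aGet a k))).foldl
        (fun R t => R.set t (some (aGet a k))) (Rk a k) = Rk a (k + 1) := by
  have hbetween_none : ∀ j : Nat, (∀ x ∈ (a.take k).drop (j+1), x ≤ aGet a j) →
      ((a.take k).drop (j+1)).find? (fun x => decide (x > aGet a j)) = none := by
    intro j hall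
    rw [List.find?_eq_none]
    intro x hx
    simpa using not_lt.mpr (hall x hx)
  apply List.ext_getElem?
  intro j
  rw [getElem?_foldl_set, length_Rk, getElem?_Rk a k j, getElem?_Rk a (k+1) j]
  by_cases hj : j < a.length
  · simp only [hj, if_true]
    by_cases hmem : j ∈ (SkN a k).filter (fun m => decide (aGet a m < aGet a k))
    · rcases List.mem_filter.mp hmem with ⟨hS, hlt⟩
      have hlt' : aGet a j < aGet a k := of_decide_eq_true hlt
      rcases (mem_SkN a k j).mp hS with ⟨hjk, hall⟩
      have h1 : rSpecAt a (k+1) j = some (aGet a k) := by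
        unfold rSpecAt
        rw [take_succ_aGet a k hk,
          List.drop_append_of_le_length (by simp; omega), List.find?_append,
          hbetween_none j hall]
        simp [hlt']
      simp [hmem, h1, Nat.lt_succ_of_lt hjk]
    · simp only [hmem, false_and, if_false]
      by_cases hjk : j < k
      · simp only [hjk, if_true, Nat.lt_succ_of_lt hjk, if_true]
        have hsplit : rSpecAt a (k+1) j =
            (((a.take k).drop (j+1)).find? (fun x => decide (x > aGet a j))).or
              ([aGet a k].find? (fun x => decide (x > aGet a j))) := by
          unfold rSpecAt
          rw [take_succ_aGet a k hk,
            List.drop_append_of_le_length (by simp; omega), List.find?_append]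
        by_cases hS : j ∈ SkN a k
        · have hkeep : ¬ aGet a j < aGet a k := fun h =>
            hmem (List.mem_filter.mpr ⟨hS, decide_eq_true h⟩)
          rcases (mem_SkN a k j).mp hS with ⟨_, hall⟩
          have h0 := hbetween_none j hall
          rw [hsplit, h0]
          unfold rSpecAt
          rw [h0]
          simp [hkeep]
        · have hex : ∃ x ∈ (a.take k).drop (j+1), aGet a j < x := by
            by_contra hno
            push Not at hno
            exact hS ((mem_SkN a k j).mpr ⟨hjk, hno⟩)
          obtain ⟨x, hx, hgt⟩ := hex
          have hsome : (((a.take k).drop (j+1)).find?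
              (fun x => decide (x > aGet a j))).isSome := by
            rw [List.find?_isSome]
            exact ⟨x, hx, by simpa using hgt⟩
          obtain ⟨y, hy⟩ := Option.isSome_iff_exists.mp hsome
          rw [hsplit, hy]
          unfold rSpecAt
          rw [hy]
          rfl
      · by_cases hjek : j = k
        · subst hjek
          have hnil : (a.take (j+1)).drop (j+1) = [] :=
            List.drop_eq_nil_of_le (by simp)
          simp [rSpecAt, hnil]
        · simp [hjk, show ¬ j < k + 1 by omega]
  · simp [hj]

lemma stepA_inv (a : List Int) (k : Nat) (hk : k < a.length) :
    stepA a (Lk a k, Rk a k, Sk a k) ((k : Int), aGet a k) =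
      (Lk a (k + 1), Rk a (k + 1), Sk a (k + 1)) := by
  simp only [stepA]
  rw [pop_result a k hk (Rk a k)]
  have hL : (match findGTA a (aGet a k)
      (((SkN a k).filter (fun m => decide (aGet a k ≤ aGet a m))).map
        (fun m : Nat => (m : Int))).reverse with
      | some j => some (PySem.List.pyGetD a j 0)
      | none => none) = lSpec a k := by
    rw [← List.map_reverse, findGTA_map,
      find_map_filter a (SkN a k) (aGet a k) (aGet a k) (by omega),
      SkN_find a k (le_of_lt hk)]
    rfl
  refine Prod.ext ?_ (Prod.ext ?_ ?_)
  · show PySem.List.pySetD (Lk a k) ((k : Nat) : Int) _ = _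
    rw [PySem.List.pySetD_natCast]
    rw [hL]
    exact Lk_step a k hk
  · exact Rk_step a k hk
  · show _ ++ [((k : Nat) : Int)] = _
    unfold Sk
    rw [SkN_succ a k hk]
    simp

lemma Lk_zero (a : List Int) : Lk a 0 = List.replicate a.length none := by
  apply List.ext_getElem?
  intro j
  rw [getElem?_Lk]
  by_cases hj : j < a.length
  · simp [hj]
  · simp [hj]

lemma Rk_zero (a : List Int) : Rk a 0 = List.replicate a.length none := by
  apply List.ext_getElem?
  intro j
  rw [getElem?_Rk]
  by_cases hj : j < a.length
  · simp [hj]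
  · simp [hj]

lemma foldA (a : List Int) (k : Nat) (hk : k ≤ a.length) :
    ((PySem.List.pyRange 0 (k : Int) 1).map (fun j => (j, PySem.List.pyGetD a j 0))).foldl
        (stepA a) (Lk a 0, Rk a 0, Sk a 0) = (Lk a k, Rk a k, Sk a k) := by
  induction k with
  | zero => rw [PySem.List.pyRange_one_eq_nil (by omega)]; rfl
  | succ k ih =>
    have hk' : k < a.length := by omega
    have hc : ((k + 1 : Nat) : Int) = (k : Int) + 1 := by push_cast; ring
    rw [hc, PySem.List.pyRange_one_succ_right (by omega), List.map_append,
      List.foldl_append, ih (by omega)]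
    simp only [List.map_cons, List.map_nil, List.foldl_cons, List.foldl_nil,
      PySem.List.pyGetD_natCast]
    exact stepA_inv a k hk'

lemma getNearestLarge_eq (a : List Int) :
    getNearestLarge a = (Lk a a.length, Rk a a.length) := by
  unfold getNearestLarge
  rw [PySem.List.enumerate_eq_map_pyRange a 0]
  have h0 : (List.replicate a.length (none : Option Int),
      List.replicate a.length (none : Option Int), ([] : List Int)) =
      (Lk a 0, Rk a 0, Sk a 0) := by
    rw [Lk_zero, Rk_zero]; rfl
  simp only [PySem.List.len_eq] at *
  rw [h0]
  rw [show ((a.length : Int)) = ((a.length : Nat) : Int) from rfl]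
  rw [foldA a a.length le_rfl]
  -- the final drain writes none exactly where res_right already holds none
  have hdrain : drainA (Rk a a.length) (Sk a a.length) = Rk a a.length := by
    rw [drainA_eq]
    unfold Sk
    rw [← List.map_reverse]
    have hfun : ∀ (l : List Nat) (R : List (Option Int)),
        (l.map (fun m : Nat => (m : Int))).foldl
            (fun R t => PySem.List.pySetD R t none) R =
          l.foldl (fun R t => R.set t none) R := by
      intro l R
      rw [List.foldl_map]
      congr 1
      funext R t
      simp [PySem.List.pySetD_natCast]
    rw [hfun]
    apply List.ext_getElem?
    intro j
    rw [getElem?_foldl_set, length_Rk]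
    by_cases hmem : j ∈ (SkN a a.length).reverse
    · have hS : j ∈ SkN a a.length := by simpa using hmem
      rcases (mem_SkN a a.length j).mp hS with ⟨hjk, hall⟩
      have hnone : rSpecAt a a.length j = none := by
        rw [rSpecAt, List.find?_eq_none]
        intro x hx
        simpa using not_lt.mpr (hall x hx)
      rw [getElem?_Rk]
      simp [hmem, hjk, hnone]
    · simp [hmem]
  rw [hdrain]

-- ---- B: the monotonic stack pass ----

-- st faithfully answers "nearest strictly greater to the left" queries for prefix p
def RepB (st p : List Int) : Prop :=
  ∀ v : Int, (popLE st v).getLast? = p.reverse.find? (fun x => decide (x > v))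

lemma popLE_popLE (st : List Int) (v w : Int) (h : v ≤ w) :
    popLE (popLE st v) w = popLE st w := by
  fun_induction popLE st v with
  | case1 => rfl
  | case2 st hS hle ih =>
    rw [ih]
    conv_rhs => rw [popLE]
    simp [hS, le_trans hle h]
  | case3 st hS hgt =>
    rfl

lemma RepB_step (st p : List Int) (v : Int) (h : RepB st p) :
    RepB (popLE st v ++ [v]) (p ++ [v]) := by
  intro w
  have hne : popLE st v ++ [v] ≠ [] := by simp
  by_cases hvw : v ≤ w
  · have h1 : popLE (popLE st v ++ [v]) w = popLE (popLE st v) w := by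
      rw [popLE]
      simp [hne, hvw]
    rw [h1, popLE_popLE st v w hvw, h w]
    have : (decide (v > w)) = false := by simpa using hvw
    simp [List.reverse_append, this]
  · have h1 : popLE (popLE st v ++ [v]) w = popLE st v ++ [v] := by
      rw [popLE]
      simp [hne, hvw]
    rw [h1, List.getLast?_concat]
    have : (decide (v > w)) = true := by simp; omega
    simp [List.reverse_append, this]

lemma scanB_go (rest : List Int) :
    ∀ (st p : List Int) (res : List (Option Int)), RepB st p →
      (rest.foldl (fun acc v =>
          let st' := popLE acc.2 v
          (acc.1 ++ [st'.getLast?], st' ++ [v])) (res, st)).1 =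
        res ++ (List.range rest.length).map
          (fun i => (p ++ rest.take i).reverse.find?
            (fun x => decide (x > rest.getD i 0))) := by
  induction rest with
  | nil => intro st p res _; simp
  | cons v rest' ih =>
    intro st p res h
    simp only [List.foldl_cons]
    rw [ih _ _ _ (RepB_step st p v h)]
    rw [List.length_cons, List.range_succ_eq_map, List.map_cons, List.map_map]
    have hhead : (popLE st v).getLast? =
        (p ++ (v :: rest').take 0).reverse.find?
          (fun x => decide (x > (v :: rest').getD 0 0)) := by
      simp [h v]
    have htail : ∀ i : Nat,
        ((p ++ [v]) ++ rest'.take i).reverse.find?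
            (fun x => decide (x > rest'.getD i 0)) =
          (p ++ (v :: rest').take (i + 1)).reverse.find?
            (fun x => decide (x > (v :: rest').getD (i + 1) 0)) := by
      intro i
      simp [List.take_succ_cons, List.append_assoc]
    rw [List.append_assoc]
    congr 1
    rw [List.singleton_append]
    rw [hhead]
    congr 1
    exact List.map_congr_left (fun i _ => htail i)

lemma scanB_eq (xs : List Int) :
    scanB xs = (List.range xs.length).map
      (fun i => (xs.take i).reverse.find? (fun x => decide (x > xs.getD i 0))) := by
  have hnil : RepB [] [] := by
    intro v
    simp [popLE]
  have := scanB_go xs [] [] [] hnil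
  unfold scanB
  simp only [this, List.nil_append]

lemma alt_eq (a : List Int) :
    getNearestLarge_alt a = (Lk a a.length, Rk a a.length) := by
  unfold getNearestLarge_alt
  refine Prod.ext ?_ ?_
  · show scanB a = _
    rw [scanB_eq]
    apply List.ext_getElem?
    intro j
    rw [getElem?_Lk]
    by_cases hj : j < a.length
    · simp [hj, lSpec, aGet]
    · simp [hj]
  · show (scanB a.reverse).reverse = _
    rw [scanB_eq]
    apply List.ext_getElem?
    intro j
    rw [getElem?_Rk]
    by_cases hj : j < a.length
    · have hjlen : j < ((List.range a.reverse.length).map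
          (fun i => (a.reverse.take i).reverse.find?
            (fun x => decide (x > a.reverse.getD i 0)))).length := by
        simpa using hj
      rw [List.getElem?_reverse hjlen]
      have hlen : ((List.range a.reverse.length).map
          (fun i => (a.reverse.take i).reverse.find?
            (fun x => decide (x > a.reverse.getD i 0)))).length = a.length := by simp
      rw [hlen]
      have hi : a.length - 1 - j < a.length := by omega
      rw [List.getElem?_map, List.getElem?_range (by simpa using hi)]
      have e1 : a.reverse.getD (a.length - 1 - j) 0 = aGet a j := by
        rw [List.getD_eq_getElem a.reverse 0 (by simp; omega),
          List.getElem_reverse, aGet, List.getD_eq_getElem a 0 hj]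
        congr 1
        omega
      have e2 : (a.reverse.take (a.length - 1 - j)).reverse = a.drop (j + 1) := by
        rw [List.take_reverse, List.reverse_reverse]
        congr 1
        omega
      simp only [Option.map_some]
      rw [e1, e2]
      simp [hj, rSpecAt, List.take_length]
    · rw [List.getElem?_eq_none (by simpa using Nat.le_of_not_lt hj)]
      simp [hj]

-- ===== VERDICT (by name: the statement is the Claim_ definition above) =====
theorem getNearestLarge_spec : Claim_equal_getNearestLarge := by
  intro a _
  unfold Spec_getNearestLarge
  rw [getNearestLarge_eq, alt_eq]
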